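-- pv_equiv track=rewrite | github.com/jsnhff/regender-xyz | src/parsers/play.py | _parse_scene_marker
-- ===== SOURCE A (Python) =====
-- from typing import Any, Optional
--
-- def _parse_scene_marker(line: str) -> Optional[dict[str, Any]]:
--     """Parse scene marker for number, title, and location."""
--     result = {}
--
--     # Remove "SCENE" or "Scene" prefix
--     line_cleaned = line
--     for prefix in ["SCENE ", "Scene ", "Sc. "]:
--         if line.startswith(prefix):
--             line_cleaned = line[len(prefix) :].strip()
--             break
--
--     # Extract scene number (Roman or Arabic)
--     parts = line_cleaned.split(".", 1)
--     if len(parts) >= 1: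
--         first_part = parts[0].strip()
--         # Check if it's a number
--         if all(c in "IVXivx" for c in first_part) and first_part:
--             result["number"] = first_part.upper()
--             if len(parts) > 1:
--                 result["location"] = parts[1].strip()
--         elif first_part.isdigit():
--             result["number"] = first_part
--             if len(parts) > 1:
--                 result["location"] = parts[1].strip()
--         else:
--             # No clear number, use the whole thing as location
--             result["number"] = "I"  # Default
--             result["location"] = line_cleaned
--
--     return result if result else None
-- ===== SOURCE B (Python) =====
-- from typing import Any, Callable, Optional
--
--
-- def _try_number(cleaned: str, is_num_char: Callable[[str], bool],
--                 upper: bool) -> Optional[dict[str, Any]]: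
--     """Recursive-descent parse of `cleaned` as  ws* NUM ws* ( end | '.' location ).
--
--     NUM is one or more characters accepted by is_num_char; on success the dict
--     is complete (location only when a '.' follows), otherwise None.
--     """
--     n = len(cleaned)
--     i = 0
--     while i < n and cleaned[i].isspace():
--         i += 1
--     j = i
--     while j < n and is_num_char(cleaned[j]):
--         j += 1
--     if j == i:
--         return None
--     num = cleaned[i:j].upper() if upper else cleaned[i:j]
--     k = j
--     while k < n and cleaned[k].isspace():
--         k += 1
--     if k == n:
--         return {"number": num}
--     if cleaned[k] == ".":
--         return {"number": num, "location": cleaned[k + 1:].strip()}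
--     return None
--
--
-- def _parse_scene_marker(line: str) -> Optional[dict[str, Any]]:
--     """Parse scene marker for number, title, and location."""
--     if line.startswith("SCENE ") or line.startswith("Scene "):
--         cleaned = line[6:].strip()
--     elif line.startswith("Sc. "):
--         cleaned = line[4:].strip()
--     else:
--         cleaned = line
--     return (_try_number(cleaned, lambda c: c in "IVXivx", True)
--             or _try_number(cleaned, str.isdigit, False)
--             or {"number": "I", "location": cleaned})
-- ===== Notes on version B (the rewrite author's own statement) =====
-- stated objective: alternative
-- what changed: B replaces A's split-at-first-dot / strip / whole-string classification pipeline by a recursive-descent parser: per number category (Roman chars, digits) it consumes ws* number-chars+ ws* directly off the cleaned string and requires end-of-string or the first '.', falling through to the next category and finally to the default on a parse failure.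
import Mathlib
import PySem

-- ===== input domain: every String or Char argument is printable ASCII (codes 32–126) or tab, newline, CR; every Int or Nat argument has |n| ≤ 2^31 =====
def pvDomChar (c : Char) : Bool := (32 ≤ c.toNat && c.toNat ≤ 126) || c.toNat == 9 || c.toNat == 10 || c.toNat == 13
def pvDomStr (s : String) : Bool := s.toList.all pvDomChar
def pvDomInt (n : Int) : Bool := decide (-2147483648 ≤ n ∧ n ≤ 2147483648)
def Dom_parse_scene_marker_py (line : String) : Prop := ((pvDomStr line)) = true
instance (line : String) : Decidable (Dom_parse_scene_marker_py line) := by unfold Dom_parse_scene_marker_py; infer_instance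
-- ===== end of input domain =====

-- B replaces A's split-at-first-dot / strip / classify pipeline by a recursive-descent parser:
-- per category it consumes ws* number-chars+ ws* off the cleaned string and requires end or '.',
-- falling through to the next category and finally the default (objective: alternative).

-- ===== PORT A =====
-- the for-loop over the three prefixes with break, unrolled in source order
def parse_scene_marker_py (line : String) : Option (List (String × String)) :=
  let line_cleaned :=
    if PySem.Str.startswith line "SCENE " = true then PySem.Str.strip (PySem.Str.slice line (some 6) none)
    else if PySem.Str.startswith line "Scene " = true then PySem.Str.strip (PySem.Str.slice line (some 6) none)
    else if PySem.Str.startswith line "Sc. " = true then PySem.Str.strip (PySem.Str.slice line (some 4) none)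
    else line
  match PySem.Str.splitMax? line_cleaned "." 1 with
  | none => none  -- unreachable: the separator "." is nonempty
  | some parts =>
    let result : List (String × String) :=
      if parts.length ≥ 1 then
        let first_part := PySem.Str.strip (PySem.List.pyGetD parts 0 "")
        -- `all(c in "IVXivx" for c in first_part) and first_part`
        if (first_part.toList.all fun c => PySem.Str.isIn (String.ofList [c]) "IVXivx") && !first_part.toList.isEmpty then
          ("number", PySem.Str.upper first_part) ::
            (if parts.length > 1 then [("location", PySem.Str.strip (PySem.List.pyGetD parts 1 ""))] else [])
        else if PySem.Str.strIsdigit first_part = true then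
          ("number", first_part) ::
            (if parts.length > 1 then [("location", PySem.Str.strip (PySem.List.pyGetD parts 1 ""))] else [])
        else
          [("number", "I"), ("location", line_cleaned)]
      else []
    if result.isEmpty then none else some result

-- ===== PORT B =====
-- _try_number: the index-advancing `while` loops over a char class are transcribed as the
-- takeWhile/dropWhile splits of the same left-to-right scan (exact); cleaned[i:j] is the taken run,
-- cleaned[k+1:] is the list remaining after the matched '.'.
def pvTryNumber (cleaned : List Char) (p : Char → Bool) (up : Bool) : Option (List (String × String)) :=
  let num0 := (cleaned.dropWhile PySem.Chars.isspace).takeWhile p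
  if num0.isEmpty then none
  else
    let num := if up then PySem.Chars.upper num0 else num0
    match ((cleaned.dropWhile PySem.Chars.isspace).dropWhile p).dropWhile PySem.Chars.isspace with
    | [] => some [("number", String.ofList num)]
    | '.' :: tl => some [("number", String.ofList num), ("location", String.ofList (PySem.Chars.strip tl))]
    | _ :: _ => none

def parse_scene_marker_py_alt (line : String) : Option (List (String × String)) :=
  let cleaned :=
    if PySem.Str.startswith line "SCENE " || PySem.Str.startswith line "Scene " then
      PySem.Str.strip (PySem.Str.slice line (some 6) none)
    else if PySem.Str.startswith line "Sc. " = true then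
      PySem.Str.strip (PySem.Str.slice line (some 4) none)
    else line
  match pvTryNumber cleaned.toList (fun c => "IVXivx".toList.contains c) true with
  | some d => some d
  | none =>
    match pvTryNumber cleaned.toList PySem.Chars.isdigit false with
    | some d => some d
    | none => some [("number", "I"), ("location", cleaned)]

-- ===== PRECONDITION & SPEC =====
def Spec_parse_scene_marker_py (line : String) (out : Option (List (String × String))) : Prop := out = parse_scene_marker_py_alt line
instance (line : String) (out : Option (List (String × String))) : Decidable (Spec_parse_scene_marker_py line out) := by unfold Spec_parse_scene_marker_py; infer_instance

-- ===== CLAIM (what is proved, stated in full; the proofs are below) =====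
def Claim_equal_parse_scene_marker_py : Prop := ∀ (line : String), Dom_parse_scene_marker_py line → Spec_parse_scene_marker_py line (parse_scene_marker_py line)

-- ===== LEMMAS AND PROOFS =====

-- characters accepted by either category are neither whitespace nor '.'
lemma pv_roman_char (c : Char) (h : ("IVXivx".toList.contains c) = true) :
    PySem.Chars.isspace c = false ∧ c ≠ '.' := by
  simp [show "IVXivx".toList = ['I', 'V', 'X', 'i', 'v', 'x'] from rfl] at h
  rcases h with h | h | h | h | h | h <;> subst h <;> decide

lemma pv_digit_char (c : Char) (h : PySem.Chars.isdigit c = true) :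
    PySem.Chars.isspace c = false ∧ c ≠ '.' := by
  have h48 : 48 ≤ c.toNat ∧ c.toNat ≤ 57 := by
    simp only [PySem.Chars.isdigit, Bool.and_eq_true, decide_eq_true_eq, Char.le_def,
      UInt32.le_iff_toNat_le] at h
    exact h
  simp only [PySem.Chars.isspace, Bool.or_eq_false_iff, Bool.and_eq_false_iff,
    decide_eq_false_iff_not, ne_eq]
  refine ⟨by omega, ?_⟩
  intro hc; subst hc
  have : ('.').toNat = 46 := rfl
  omega

lemma pv_ws_dot : PySem.Chars.isspace '.' = false := by decide

-- generic list facts specialised to our scans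
lemma pv_dropWhile_all_false {q : Char → Bool} {l : List Char} (h : ∀ c ∈ l, q c = false) :
    l.dropWhile q = l := by
  induction l with
  | nil => rfl
  | cons c r ih =>
    simp [List.dropWhile_cons, h c (by simp), ih (fun a ha => h a (by simp [ha]))]

lemma pv_takeWhile_append_all {q : Char → Bool} {l : List Char} (m : List Char)
    (h : ∀ c ∈ l, q c = true) : (l ++ m).takeWhile q = l ++ m.takeWhile q := by
  rw [List.takeWhile_append]
  simp [List.takeWhile_eq_self_iff.mpr h]

lemma pv_head_dropWhile_false {q : Char → Bool} {l r : List Char} {c : Char}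
    (h : l.dropWhile q = c :: r) : q c = false := by
  induction l with
  | nil => simp at h
  | cons a l' ih =>
    by_cases hq : q a
    · exact ih (by simpa [List.dropWhile_cons, hq] using h)
    · rw [List.dropWhile_cons, if_neg (by simp [hq])] at h
      cases h
      simpa using hq

lemma pv_rstrip_keep (u v : List Char) (e : Char) (he : PySem.Chars.isspace e = false) :
    PySem.Chars.rstrip (u ++ e :: v) = u ++ e :: PySem.Chars.rstrip v := by
  unfold PySem.Chars.rstrip
  rw [show u ++ e :: v = u ++ [e] ++ v by simp, List.reverse_append, List.reverse_append,
    List.dropWhile_append]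
  split_ifs with h
  · rw [List.isEmpty_iff] at h
    simp [h, List.dropWhile_cons, he]
  · simp

lemma pv_rstrip_ws (u b : List Char) (hb : ∀ c ∈ b, PySem.Chars.isspace c = true) :
    PySem.Chars.rstrip (u ++ b) = PySem.Chars.rstrip u := by
  unfold PySem.Chars.rstrip
  have hnil : List.dropWhile PySem.Chars.isspace b.reverse = [] :=
    List.dropWhile_eq_nil_iff.mpr (fun c hc => hb c (by simpa using hc))
  rw [List.reverse_append, List.dropWhile_append, hnil]
  simp

lemma pv_rstrip_self (u : List Char) (hu : ∀ c ∈ u, PySem.Chars.isspace c = false) :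
    PySem.Chars.rstrip u = u := by
  unfold PySem.Chars.rstrip
  rw [pv_dropWhile_all_false (fun c hc => hu c (by simpa using hc)), List.reverse_reverse]

-- leading-whitespace removal commutes with cutting at the first '.'
lemma pv_commute (cs : List Char) :
    (cs.takeWhile (fun c => c != '.')).dropWhile PySem.Chars.isspace =
      (cs.dropWhile PySem.Chars.isspace).takeWhile (fun c => c != '.') := by
  induction cs with
  | nil => rfl
  | cons c r ih =>
    by_cases hws : PySem.Chars.isspace c
    · have hcdot : (c != '.') = true := by
        simp only [bne_iff_ne, ne_eq]
        intro hc; subst hc; simp [pv_ws_dot] at hws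
      simp [List.takeWhile_cons, List.dropWhile_cons, hcdot, hws, ih]
    · by_cases hcdot : c = '.'
      · subst hcdot
        simp [List.takeWhile_cons, List.dropWhile_cons, hws]
      · simp [List.takeWhile_cons, List.dropWhile_cons, hws, hcdot]

-- the heart of the proof: the recursive-descent attempt for one category equals
-- A's "strip the part before the first dot, check every char, emit number/location".
lemma pv_tryNumber_eq (p : Char → Bool)
    (hp : ∀ c, p c = true → PySem.Chars.isspace c = false ∧ c ≠ '.') (up : Bool) (cs : List Char) :
    pvTryNumber cs p up =
      (if ((PySem.Chars.strip (cs.takeWhile (fun c => c != '.'))).all p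
            && !(PySem.Chars.strip (cs.takeWhile (fun c => c != '.'))).isEmpty) then
        some (("number",
            String.ofList (if up then PySem.Chars.upper (PySem.Chars.strip (cs.takeWhile (fun c => c != '.')))
                           else PySem.Chars.strip (cs.takeWhile (fun c => c != '.')))) ::
          (if '.' ∈ cs then
            [("location", String.ofList (PySem.Chars.strip
               (cs.drop ((cs.takeWhile (fun c => c != '.')).length + 1))))]
           else []))
      else none) := by
  have hsL : PySem.Chars.strip (cs.takeWhile (fun c => c != '.')) =
      PySem.Chars.rstrip ((cs.dropWhile PySem.Chars.isspace).takeWhile (fun c => c != '.')) := by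
    unfold PySem.Chars.strip PySem.Chars.lstrip
    rw [pv_commute]
  have hw_ws : ∀ c ∈ cs.takeWhile PySem.Chars.isspace, PySem.Chars.isspace c = true :=
    fun c hc => List.mem_takeWhile_imp hc
  have hw_dot : ∀ c ∈ cs.takeWhile PySem.Chars.isspace, (c != '.') = true := by
    intro c hc
    simp only [bne_iff_ne, ne_eq]
    intro h; subst h
    exact absurd (hw_ws _ hc) (by simp [pv_ws_dot])
  have hcs : cs.takeWhile PySem.Chars.isspace ++ cs.dropWhile PySem.Chars.isspace = cs :=
    List.takeWhile_append_dropWhile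
  have hdot_mem : ('.' ∈ cs) ↔ ('.' ∈ cs.dropWhile PySem.Chars.isspace) := by
    conv_lhs => rw [← hcs]
    simp only [List.mem_append]
    constructor
    · rintro (h | h)
      · exact absurd (hw_ws _ h) (by simp [pv_ws_dot])
      · exact h
    · exact Or.inr
  have htake_cs : cs.takeWhile (fun c => c != '.') =
      cs.takeWhile PySem.Chars.isspace ++ (cs.dropWhile PySem.Chars.isspace).takeWhile (fun c => c != '.') := by
    conv_lhs => rw [← hcs]
    exact pv_takeWhile_append_all _ hw_dot
  have hdrop_cs : ∀ k, cs.drop ((cs.takeWhile PySem.Chars.isspace).length + k) =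
      (cs.dropWhile PySem.Chars.isspace).drop k := by
    intro k
    have h := List.drop_length_add_append (l₁ := cs.takeWhile PySem.Chars.isspace)
      (l₂ := cs.dropWhile PySem.Chars.isspace) k
    rw [hcs] at h
    exact h
  rw [hsL]
  unfold pvTryNumber
  generalize hg : cs.dropWhile PySem.Chars.isspace = r1 at hdot_mem htake_cs hdrop_cs ⊢
  rcases ha : r1.takeWhile p with _ | ⟨c0, a0⟩
  · -- the category scan finds no char: A's stripped head is empty or starts with a bad char
    cases r1 with
    | nil => simp [PySem.Chars.rstrip]
    | cons c r' =>
      have hpc : p c = false := by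
        by_cases h : p c
        · simp [List.takeWhile_cons, h] at ha
        · simpa using h
      have hcws : PySem.Chars.isspace c = false := pv_head_dropWhile_false hg
      by_cases hcdot : c = '.'
      · subst hcdot
        simp [List.takeWhile_cons, PySem.Chars.rstrip]
      · rw [show (c :: r').takeWhile (fun c => c != '.') = c :: r'.takeWhile (fun c => c != '.') by
          simp [List.takeWhile_cons, hcdot]]
        rw [show (c : Char) :: r'.takeWhile (fun c => c != '.') =
            [] ++ c :: r'.takeWhile (fun c => c != '.') by simp,
          pv_rstrip_keep _ _ _ hcws]
        simp [hpc]
  · -- the scan takes a nonempty run  c0 :: a0 = takeWhile p r1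
    have ha_p : ∀ c ∈ r1.takeWhile p, p c = true := fun c hc => List.mem_takeWhile_imp hc
    have hallp : ((c0 :: a0).all p) = true := by rw [← ha]; exact List.all_eq_true.mpr ha_p
    have ha_ws : ∀ c ∈ r1.takeWhile p, PySem.Chars.isspace c = false :=
      fun c hc => (hp c (ha_p c hc)).1
    have ha_dot : ∀ c ∈ r1.takeWhile p, (c != '.') = true := by
      intro c hc
      simpa using (hp c (ha_p c hc)).2
    have hr1split : r1 = r1.takeWhile p ++ r1.dropWhile p :=
      List.takeWhile_append_dropWhile.symm
    have ht1 : r1.takeWhile (fun c => c != '.') =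
        r1.takeWhile p ++ (r1.dropWhile p).takeWhile (fun c => c != '.') := by
      conv_lhs => rw [hr1split]
      exact pv_takeWhile_append_all _ ha_dot
    rcases hr3 : (r1.dropWhile p).dropWhile PySem.Chars.isspace with _ | ⟨e, tl⟩
    · -- nothing or only whitespace after the number: success, no location
      have hr2ws : ∀ c ∈ r1.dropWhile p, PySem.Chars.isspace c = true :=
        List.dropWhile_eq_nil_iff.mp hr3
      have ht2 : (r1.dropWhile p).takeWhile (fun c => c != '.') = r1.dropWhile p := by
        apply List.takeWhile_eq_self_iff.mpr
        intro c hc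
        simp only [bne_iff_ne, ne_eq]
        intro h; subst h
        exact absurd (hr2ws _ hc) (by simp [pv_ws_dot])
      have hs2 : PySem.Chars.rstrip (r1.takeWhile (fun c => c != '.')) = c0 :: a0 := by
        rw [ht1, ht2, pv_rstrip_ws _ _ hr2ws, pv_rstrip_self _ ha_ws, ha]
      have hdot : ¬ ('.' ∈ cs) := by
        rw [hdot_mem, hr1split]
        simp only [List.mem_append]
        rintro (h | h)
        · simpa using ha_dot _ h
        · exact absurd (hr2ws _ h) (by simp [pv_ws_dot])
      rw [hs2]
      simp [hallp, hdot]
    · have he_ws : PySem.Chars.isspace e = false := pv_head_dropWhile_false hr3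
      have hr2split : r1.dropWhile p =
          (r1.dropWhile p).takeWhile PySem.Chars.isspace ++ (e :: tl) := by
        conv_lhs => rw [← List.takeWhile_append_dropWhile
          (p := PySem.Chars.isspace) (l := r1.dropWhile p), hr3]
      have hb_ws : ∀ c ∈ (r1.dropWhile p).takeWhile PySem.Chars.isspace,
          PySem.Chars.isspace c = true := fun c hc => List.mem_takeWhile_imp hc
      have hb_dot : ∀ c ∈ (r1.dropWhile p).takeWhile PySem.Chars.isspace, (c != '.') = true := by
        intro c hc
        simp only [bne_iff_ne, ne_eq]
        intro h; subst h
        exact absurd (hb_ws _ hc) (by simp [pv_ws_dot])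
      by_cases hedot : e = '.'
      · -- '.' follows the number: success with a location
        subst hedot
        have ht2 : (r1.dropWhile p).takeWhile (fun c => c != '.') =
            (r1.dropWhile p).takeWhile PySem.Chars.isspace := by
          conv_lhs => rw [hr2split]
          rw [pv_takeWhile_append_all _ hb_dot]
          simp [List.takeWhile_cons]
        have hs2 : PySem.Chars.rstrip (r1.takeWhile (fun c => c != '.')) = c0 :: a0 := by
          rw [ht1, ht2, pv_rstrip_ws _ _ hb_ws, pv_rstrip_self _ ha_ws, ha]
        have hdot : '.' ∈ cs := by
          rw [hdot_mem, hr1split, hr2split]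
          simp
        have hr1eq : r1 = (r1.takeWhile p ++ (r1.dropWhile p).takeWhile PySem.Chars.isspace)
            ++ '.' :: tl := by
          calc r1 = r1.takeWhile p ++ r1.dropWhile p := hr1split
          _ = r1.takeWhile p ++ ((r1.dropWhile p).takeWhile PySem.Chars.isspace ++ '.' :: tl) := by
              rw [← hr2split]
          _ = _ := by simp
        have hdropcs : cs.drop ((cs.takeWhile (fun c => c != '.')).length + 1) = tl := by
          rw [htake_cs, List.length_append, Nat.add_assoc, hdrop_cs, ht1, ht2]
          set n := (r1.takeWhile p ++ (r1.dropWhile p).takeWhile PySem.Chars.isspace).length + 1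
            with hn
          rw [hr1eq, hn]
          have h := List.drop_length_add_append
            (l₁ := r1.takeWhile p ++ (r1.dropWhile p).takeWhile PySem.Chars.isspace)
            (l₂ := ('.' : Char) :: tl) 1
          simpa using h
        rw [hs2, hdropcs]
        simp [hallp, hdot]
      · -- something else follows: the stripped head keeps a bad char, both fail
        have ht2 : (r1.dropWhile p).takeWhile (fun c => c != '.') =
            (r1.dropWhile p).takeWhile PySem.Chars.isspace ++ e :: tl.takeWhile (fun c => c != '.') := by
          conv_lhs => rw [hr2split]
          rw [pv_takeWhile_append_all _ hb_dot]
          simp [List.takeWhile_cons, hedot]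
        have hs2 : PySem.Chars.rstrip (r1.takeWhile (fun c => c != '.')) =
            (r1.takeWhile p ++ (r1.dropWhile p).takeWhile PySem.Chars.isspace) ++
              e :: PySem.Chars.rstrip (tl.takeWhile (fun c => c != '.')) := by
          rw [ht1, ht2, show r1.takeWhile p ++ ((r1.dropWhile p).takeWhile PySem.Chars.isspace ++
            e :: tl.takeWhile (fun c => c != '.')) =
            (r1.takeWhile p ++ (r1.dropWhile p).takeWhile PySem.Chars.isspace) ++
            e :: tl.takeWhile (fun c => c != '.') by simp, pv_rstrip_keep _ _ _ he_ws]
        have hall : (PySem.Chars.rstrip (r1.takeWhile (fun c => c != '.'))).all p = false := by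
          rw [hs2]
          cases hb : (r1.dropWhile p).takeWhile PySem.Chars.isspace with
          | nil =>
            have hre : r1.dropWhile p = e :: tl := by rw [hr2split, hb]; rfl
            have hpe : p e = false := pv_head_dropWhile_false hre
            simp [hpe]
          | cons b0 b0s =>
            have hb0 : PySem.Chars.isspace b0 = true := hb_ws b0 (by rw [hb]; simp)
            have hpb0 : p b0 = false := by
              by_cases h : p b0
              · rw [(hp b0 (by simpa using h)).1] at hb0; simp at hb0
              · simpa using h
            simp [hpb0]
        rw [hall]
        simp only [Bool.false_and, Bool.false_eq_true, if_false]
        split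
        · next heq => exact absurd (by injection heq) hedot
        · rfl

-- split(".", 1) characterised by takeWhile/drop (A side)
lemma pv_go_zero (fuel : Nat) (l cur : List Char) (acc : List (List Char)) :
    PySem.Chars.splitOnMax.go ['.'] fuel 0 l cur acc = ((cur.reverse ++ l) :: acc).reverse := by
  cases fuel <;> cases l <;> simp [PySem.Chars.splitOnMax.go]

lemma pv_go_one (l : List Char) : ∀ (fuel : Nat) (cur : List Char) (acc : List (List Char)),
    l.length < fuel →
    PySem.Chars.splitOnMax.go ['.'] fuel 1 l cur acc =
      if '.' ∈ l then
        acc.reverse ++ [cur.reverse ++ l.takeWhile (fun c => c != '.'),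
                        l.drop ((l.takeWhile (fun c => c != '.')).length + 1)]
      else acc.reverse ++ [cur.reverse ++ l] := by
  induction l with
  | nil =>
    intro fuel cur acc h
    cases fuel with
    | zero => omega
    | succ n => simp [PySem.Chars.splitOnMax.go]
  | cons c rest ih =>
    intro fuel cur acc h
    cases fuel with
    | zero => omega
    | succ n =>
      by_cases hc : c = '.'
      · subst hc
        rw [PySem.Chars.splitOnMax.go]
        simp [pv_go_zero]
      · rw [PySem.Chars.splitOnMax.go]
        have hp : ['.'].isPrefixOf (c :: rest) = false := by
          simp [List.isPrefixOf]; exact fun h => absurd h.symm hc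
        rw [ih n (c :: cur) acc (by simp at h; omega)] at *
        simp [hp, hc, Ne.symm hc]

lemma pv_split_char (cs : List Char) :
    PySem.Chars.splitOnMax cs ['.'] 1 =
      if '.' ∈ cs then
        [cs.takeWhile (fun c => c != '.'), cs.drop ((cs.takeWhile (fun c => c != '.')).length + 1)]
      else [cs] := by
  have := pv_go_one cs (cs.length + 1) [] [] (by omega)
  simpa [PySem.Chars.splitOnMax] using this

-- A's per-char membership test is membership in the same six-char list
lemma pv_isIn_single (c : Char) :
    PySem.Str.isIn (String.ofList [c]) "IVXivx" = ("IVXivx".toList.contains c) := by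
  rw [Bool.eq_iff_iff]
  rw [PySem.Str.isIn_iff_infix, String.toList_ofList, List.singleton_infix_iff,
    List.contains_iff_mem]

-- proof-side restatements of the two ports' tails (the code after `cleaned` is computed)
def pvTailA (line_cleaned : String) : Option (List (String × String)) :=
  match PySem.Str.splitMax? line_cleaned "." 1 with
  | none => none
  | some parts =>
    let result : List (String × String) :=
      if parts.length ≥ 1 then
        let first_part := PySem.Str.strip (PySem.List.pyGetD parts 0 "")
        if (first_part.toList.all fun c => PySem.Str.isIn (String.ofList [c]) "IVXivx") && !first_part.toList.isEmpty then
          ("number", PySem.Str.upper first_part) ::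
            (if parts.length > 1 then [("location", PySem.Str.strip (PySem.List.pyGetD parts 1 ""))] else [])
        else if PySem.Str.strIsdigit first_part = true then
          ("number", first_part) ::
            (if parts.length > 1 then [("location", PySem.Str.strip (PySem.List.pyGetD parts 1 ""))] else [])
        else
          [("number", "I"), ("location", line_cleaned)]
      else []
    if result.isEmpty then none else some result

def pvTailB (cleaned : String) : Option (List (String × String)) :=
  match pvTryNumber cleaned.toList (fun c => "IVXivx".toList.contains c) true with
  | some d => some d
  | none =>
    match pvTryNumber cleaned.toList PySem.Chars.isdigit false with
    | some d => some d
    | none => some [("number", "I"), ("location", cleaned)]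

lemma pv_tail_eq (cl : String) : pvTailA cl = pvTailB cl := by
  unfold pvTailA pvTailB
  rw [pv_tryNumber_eq _ pv_roman_char true, pv_tryNumber_eq _ pv_digit_char false]
  by_cases hd : '.' ∈ cl.toList
  · have hsplit : PySem.Str.splitMax? cl "." 1 =
        some [String.ofList (cl.toList.takeWhile (fun c => c != '.')),
              String.ofList (cl.toList.drop ((cl.toList.takeWhile (fun c => c != '.')).length + 1))] := by
      simp [PySem.Str.splitMax?, PySem.Chars.splitMax?, pv_split_char, hd]
    rw [hsplit]
    have hg0 : ∀ (x y : String), PySem.List.pyGetD [x, y] (0 : Int) "" = x := fun _ _ => rfl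
    have hg1 : ∀ (x y : String), PySem.List.pyGetD [x, y] (1 : Int) "" = y := fun _ _ => rfl
    simp only [hg0, hg1, hd, if_true, PySem.Str.strip, PySem.Str.upper, PySem.Str.strIsdigit,
      PySem.Chars.strIsdigit, pv_isIn_single, String.toList_ofList, List.length_cons,
      List.length_nil]
    by_cases hA : (PySem.Chars.strip (cl.toList.takeWhile (fun c => c != '.'))).all
        (fun c => "IVXivx".toList.contains c) <;>
      by_cases hE : (PySem.Chars.strip (cl.toList.takeWhile (fun c => c != '.'))).isEmpty <;>
      by_cases hD : (PySem.Chars.strip (cl.toList.takeWhile (fun c => c != '.'))).all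
        PySem.Chars.isdigit <;>
      simp only [hA, hE, hD] <;> simp
  · have hsplit : PySem.Str.splitMax? cl "." 1 = some [String.ofList cl.toList] := by
      simp [PySem.Str.splitMax?, PySem.Chars.splitMax?, pv_split_char, hd]
    have htw : cl.toList.takeWhile (fun c => c != '.') = cl.toList := by
      apply List.takeWhile_eq_self_iff.mpr
      intro c hc
      simp only [bne_iff_ne, ne_eq]
      intro h; subst h; exact hd hc
    have hg0 : ∀ (x : String), PySem.List.pyGetD [x] (0 : Int) "" = x := fun _ => rfl
    rw [hsplit]
    simp only [hg0, hd, if_false, htw, PySem.Str.strip, PySem.Str.upper, PySem.Str.strIsdigit,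
      PySem.Chars.strIsdigit, pv_isIn_single, String.toList_ofList, List.length_cons,
      List.length_nil, String.ofList_toList]
    by_cases hA : (PySem.Chars.strip cl.toList).all (fun c => "IVXivx".toList.contains c) <;>
      by_cases hE : (PySem.Chars.strip cl.toList).isEmpty <;>
      by_cases hD : (PySem.Chars.strip cl.toList).all PySem.Chars.isdigit <;>
      simp only [hA, hE, hD] <;> simp

-- ===== VERDICT (by name: the statement is the Claim_ definition above) =====
theorem parse_scene_marker_py_spec : Claim_equal_parse_scene_marker_py := by
  intro line _
  unfold Spec_parse_scene_marker_py
  have hA : parse_scene_marker_py line =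
      pvTailA (if PySem.Str.startswith line "SCENE " = true then PySem.Str.strip (PySem.Str.slice line (some 6) none)
        else if PySem.Str.startswith line "Scene " = true then PySem.Str.strip (PySem.Str.slice line (some 6) none)
        else if PySem.Str.startswith line "Sc. " = true then PySem.Str.strip (PySem.Str.slice line (some 4) none)
        else line) := rfl
  have hB : parse_scene_marker_py_alt line =
      pvTailB (if PySem.Str.startswith line "SCENE " || PySem.Str.startswith line "Scene " then
          PySem.Str.strip (PySem.Str.slice line (some 6) none)
        else if PySem.Str.startswith line "Sc. " = true then PySem.Str.strip (PySem.Str.slice line (some 4) none)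
        else line) := rfl
  rw [hA, hB, pv_tail_eq]
  congr 1
  cases h1 : PySem.Str.startswith line "SCENE " <;>
    cases h2 : PySem.Str.startswith line "Scene " <;> simp [*]
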